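-- pv_equiv track=rewrite | github.com/knifecaojia/procvision | src/services/result_report_service.py | _sanitize_url
-- ===== SOURCE A (Python) =====
-- def _sanitize_url(url: str) -> str:
--     s = str(url or "").strip()
--     while True:
--         before = s
--         s = s.strip().strip("`").strip().strip("'").strip().strip('"').strip()
--         if s == before:
--             break
--     return s
-- ===== SOURCE B (Python) =====
-- def _sanitize_url(url: str) -> str:
--     s = str(url or "")
--     quotes = "`'\""
--     i, j = 0, len(s)
--     while i < j and (s[i].isspace() or s[i] in quotes):
--         i += 1
--     while j > i and (s[j - 1].isspace() or s[j - 1] in quotes):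
--         j -= 1
--     return s[i:j]
-- ===== Notes on version B (the rewrite author's own statement) =====
-- stated objective: simpler
-- what changed: Replaces the strip-until-fixpoint loop (seven strip passes per iteration) with a single two-pointer scan that trims every whitespace/backtick/quote character from both ends in one pass.
import Mathlib
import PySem

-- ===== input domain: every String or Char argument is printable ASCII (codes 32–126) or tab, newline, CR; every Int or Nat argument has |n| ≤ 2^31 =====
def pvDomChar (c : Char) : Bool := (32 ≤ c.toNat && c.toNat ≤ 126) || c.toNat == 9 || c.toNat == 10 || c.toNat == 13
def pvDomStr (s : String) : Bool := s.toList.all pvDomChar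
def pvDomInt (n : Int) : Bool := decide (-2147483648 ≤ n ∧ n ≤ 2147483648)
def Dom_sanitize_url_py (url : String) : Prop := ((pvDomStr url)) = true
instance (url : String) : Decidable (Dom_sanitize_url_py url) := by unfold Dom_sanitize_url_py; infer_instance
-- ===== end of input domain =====

-- B replaces A's strip-until-fixpoint loop with one two-pointer trim of all
-- whitespace/backtick/quote characters from both ends (objective: simpler).

-- ===== PORT A =====
-- left/right trim with predicate p (the shape of Python's str.strip variants);
-- used only to prove the termination fact pvStepA_lt that the loop's port cites.
def pvTr (p : Char → Bool) (x : List Char) : List Char :=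
  ((x.dropWhile p).reverse.dropWhile p).reverse

theorem pvDw_len (p : Char → Bool) (x : List Char) :
    (x.dropWhile p).length ≤ x.length :=
  (List.dropWhile_suffix p).sublist.length_le

theorem pvDw_eq_of_len (p : Char → Bool) (x : List Char)
    (h : (x.dropWhile p).length = x.length) : x.dropWhile p = x :=
  (List.dropWhile_suffix p).sublist.eq_of_length h

theorem pvTr_len (p : Char → Bool) (x : List Char) :
    (pvTr p x).length ≤ x.length := by
  unfold pvTr
  have h1 := pvDw_len p x
  have h2 := pvDw_len p (x.dropWhile p).reverse
  simp only [List.length_reverse] at *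
  omega

theorem pvTr_eq_of_len (p : Char → Bool) (x : List Char)
    (h : (pvTr p x).length = x.length) : pvTr p x = x := by
  have h1 := pvDw_len p x
  have h2 := pvDw_len p (x.dropWhile p).reverse
  unfold pvTr at h ⊢
  simp only [List.length_reverse] at h h2
  have e1 : x.dropWhile p = x := pvDw_eq_of_len p x (by omega)
  rw [e1] at h ⊢
  have e2 : x.reverse.dropWhile p = x.reverse := by
    apply pvDw_eq_of_len
    rw [List.length_reverse]
    exact h
  rw [e2, List.reverse_reverse]

theorem pvStrip_eq_Tr (x : List Char) :
    PySem.Chars.strip x = pvTr PySem.Chars.isspace x := rfl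

theorem pvStripChars_eq_Tr (x cs : List Char) :
    PySem.Chars.stripChars x cs = pvTr (fun c => cs.contains c) x := rfl

-- one iteration of A's while-loop body
def pvStepA (l : List Char) : List Char :=
  PySem.Chars.strip (PySem.Chars.stripChars (PySem.Chars.strip
    (PySem.Chars.stripChars (PySem.Chars.strip
      (PySem.Chars.stripChars (PySem.Chars.strip l) ['`'])) ['\''])) ['"'])

-- for a step whose result has full length, every constituent trim fixes l
theorem pvStepA_fixes (l : List Char) (h : (pvStepA l).length = l.length) :
    pvTr PySem.Chars.isspace l = l ∧ pvTr (fun c => List.contains ['`'] c) l = l ∧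
    pvTr (fun c => List.contains ['\''] c) l = l ∧ pvTr (fun c => List.contains ['"'] c) l = l ∧
    pvStepA l = l := by
  unfold pvStepA at h ⊢
  rw [pvStrip_eq_Tr, pvStripChars_eq_Tr, pvStrip_eq_Tr, pvStripChars_eq_Tr,
    pvStrip_eq_Tr, pvStripChars_eq_Tr, pvStrip_eq_Tr] at h ⊢
  have e1 : pvTr PySem.Chars.isspace l = l := by
    by_contra hne
    have hlt : (pvTr PySem.Chars.isspace l).length < l.length :=
      lt_of_le_of_ne (pvTr_len _ _) (fun hl => hne (pvTr_eq_of_len _ _ hl))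
    have hch : (pvTr PySem.Chars.isspace
        (pvTr (fun c => List.contains ['"'] c) (pvTr PySem.Chars.isspace
        (pvTr (fun c => List.contains ['\''] c) (pvTr PySem.Chars.isspace
        (pvTr (fun c => List.contains ['`'] c) (pvTr PySem.Chars.isspace l))))))).length
        ≤ (pvTr PySem.Chars.isspace l).length := by
      calc _ ≤ _ := pvTr_len _ _
        _ ≤ _ := pvTr_len _ _
        _ ≤ _ := pvTr_len _ _
        _ ≤ _ := pvTr_len _ _
        _ ≤ _ := pvTr_len _ _
        _ ≤ _ := pvTr_len _ _
    omega
  rw [e1] at h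
  have e2 : pvTr (fun c => List.contains ['`'] c) l = l := by
    by_contra hne
    have hlt : (pvTr (fun c => List.contains ['`'] c) l).length < l.length :=
      lt_of_le_of_ne (pvTr_len _ _) (fun hl => hne (pvTr_eq_of_len _ _ hl))
    have hch : (pvTr PySem.Chars.isspace
        (pvTr (fun c => List.contains ['"'] c) (pvTr PySem.Chars.isspace
        (pvTr (fun c => List.contains ['\''] c) (pvTr PySem.Chars.isspace
        (pvTr (fun c => List.contains ['`'] c) l)))))).length
        ≤ (pvTr (fun c => List.contains ['`'] c) l).length := by
      calc _ ≤ _ := pvTr_len _ _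
        _ ≤ _ := pvTr_len _ _
        _ ≤ _ := pvTr_len _ _
        _ ≤ _ := pvTr_len _ _
        _ ≤ _ := pvTr_len _ _
    omega
  rw [e2, e1] at h
  have e3 : pvTr (fun c => List.contains ['\''] c) l = l := by
    by_contra hne
    have hlt : (pvTr (fun c => List.contains ['\''] c) l).length < l.length :=
      lt_of_le_of_ne (pvTr_len _ _) (fun hl => hne (pvTr_eq_of_len _ _ hl))
    have hch : (pvTr PySem.Chars.isspace
        (pvTr (fun c => List.contains ['"'] c) (pvTr PySem.Chars.isspace
        (pvTr (fun c => List.contains ['\''] c) l)))).length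
        ≤ (pvTr (fun c => List.contains ['\''] c) l).length := by
      calc _ ≤ _ := pvTr_len _ _
        _ ≤ _ := pvTr_len _ _
        _ ≤ _ := pvTr_len _ _
    omega
  rw [e3, e1] at h
  have e4 : pvTr (fun c => List.contains ['"'] c) l = l := by
    by_contra hne
    have hlt : (pvTr (fun c => List.contains ['"'] c) l).length < l.length :=
      lt_of_le_of_ne (pvTr_len _ _) (fun hl => hne (pvTr_eq_of_len _ _ hl))
    have hch : (pvTr PySem.Chars.isspace (pvTr (fun c => List.contains ['"'] c) l)).length
        ≤ (pvTr (fun c => List.contains ['"'] c) l).length := pvTr_len _ _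
    omega
  refine ⟨e1, e2, e3, e4, ?_⟩
  rw [e1, e2, e1, e3, e1, e4, e1]

theorem pvStepA_eq_of_len (l : List Char) (h : (pvStepA l).length = l.length) :
    pvStepA l = l := (pvStepA_fixes l h).2.2.2.2

theorem pvStepA_len (l : List Char) : (pvStepA l).length ≤ l.length := by
  unfold pvStepA
  rw [pvStrip_eq_Tr, pvStripChars_eq_Tr, pvStrip_eq_Tr, pvStripChars_eq_Tr,
    pvStrip_eq_Tr, pvStripChars_eq_Tr, pvStrip_eq_Tr]
  calc _ ≤ _ := pvTr_len _ _
    _ ≤ _ := pvTr_len _ _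
    _ ≤ _ := pvTr_len _ _
    _ ≤ _ := pvTr_len _ _
    _ ≤ _ := pvTr_len _ _
    _ ≤ _ := pvTr_len _ _
    _ ≤ _ := pvTr_len _ _

theorem pvStepA_lt (l : List Char) (h : ¬ pvStepA l = l) :
    (pvStepA l).length < l.length := by
  have hle := pvStepA_len l
  rcases lt_or_eq_of_le hle with hlt | heq
  · exact hlt
  · exact absurd (pvStepA_eq_of_len l heq) h

-- A's while True loop: strip seven ways until nothing changes
def pvLoopA (l : List Char) : List Char :=
  if _h : pvStepA l = l then l else pvLoopA (pvStepA l)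
termination_by l.length
decreasing_by exact pvStepA_lt l _h

def sanitize_url_py (url : String) : String :=
  let s := if url == "" then "" else url       -- str(url or "")
  String.ofList (pvLoopA (PySem.Chars.strip s.toList))

-- ===== PORT B =====
def sanitize_url_py_alt (url : String) : String :=
  let s := if url == "" then "" else url       -- str(url or "")
  -- strippable test: whitespace or one of ` ' "
  let q := fun c => PySem.Chars.isspace c || c == '`' || c == '\'' || c == '"'
  -- advance from the front while strippable, then from the back while strippable
  String.ofList (((s.toList.dropWhile q).reverse.dropWhile q).reverse)

-- ===== PRECONDITION & SPEC =====
def Spec_sanitize_url_py (url : String) (out : String) : Prop := out = sanitize_url_py_alt url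
instance (url : String) (out : String) : Decidable (Spec_sanitize_url_py url out) := by unfold Spec_sanitize_url_py; infer_instance

-- ===== CLAIM (what is proved, stated in full; the proofs are below) =====
def Claim_equal_sanitize_url_py : Prop := ∀ (url : String), Dom_sanitize_url_py url → Spec_sanitize_url_py url (sanitize_url_py url)

-- ===== LEMMAS AND PROOFS =====
def pvQ (c : Char) : Bool := PySem.Chars.isspace c || c == '`' || c == '\'' || c == '"'

theorem pvDw_dw {p q : Char → Bool} (himp : ∀ c, p c = true → q c = true)
    (x : List Char) : (x.dropWhile p).dropWhile q = x.dropWhile q := by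
  induction x with
  | nil => rfl
  | cons a t ih =>
    by_cases hp : p a = true
    · rw [List.dropWhile_cons_of_pos hp, List.dropWhile_cons_of_pos (himp a hp), ih]
    · rw [List.dropWhile_cons_of_neg hp]

-- right trim of a cons: drops a only when everything is strippable
theorem pvRt_cons (q : Char → Bool) (a : Char) (t : List Char) :
    ((a :: t).reverse.dropWhile q).reverse =
      if (a :: t).all q then [] else a :: (t.reverse.dropWhile q).reverse := by
  rw [List.reverse_cons, List.dropWhile_append]
  by_cases hall : t.reverse.dropWhile q = []
  · have ht : t.all q := by
      have : ∀ c ∈ t.reverse, q c := by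
        intro c hc
        by_contra hqc
        have := List.dropWhile_eq_nil_iff.mp hall c hc
        exact hqc this
      simp only [List.all_eq_true]
      intro c hc; exact this c (List.mem_reverse.mpr hc)
    rw [hall]
    simp only [List.isEmpty_nil, if_true]
    by_cases hqa : q a = true
    · simp [List.dropWhile, hqa, ht]
    · simp [List.dropWhile, hqa, ht]
  · have hne : (t.reverse.dropWhile q).isEmpty = false := by
      simpa [List.isEmpty_iff] using hall
    rw [hne]
    have htall : (a :: t).all q = false := by
      simp only [List.all_cons, Bool.and_eq_false_iff]
      right
      by_contra h
      have ht : t.all q := by simpa using h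
      apply hall
      rw [List.dropWhile_eq_nil_iff]
      intro c hc
      exact (List.all_eq_true.mp ht) c (List.mem_reverse.mp hc)
    simp [htall]

-- front-trim and back-trim commute
theorem pvLtRt_comm (q : Char → Bool) (x : List Char) :
    (x.reverse.dropWhile q).reverse.dropWhile q =
      ((x.dropWhile q).reverse.dropWhile q).reverse := by
  induction x with
  | nil => rfl
  | cons a t ih =>
    by_cases hqa : q a = true
    · by_cases hall : (a :: t).all q
      · have ht : t.all q := by simpa [hqa] using hall
        have ht' : t.reverse.dropWhile q = [] := by
          rw [List.dropWhile_eq_nil_iff]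
          intro c hc
          exact (List.all_eq_true.mp ht) c (List.mem_reverse.mp hc)
        have hdt : t.dropWhile q = [] := by
          rw [List.dropWhile_eq_nil_iff]
          intro c hc
          exact (List.all_eq_true.mp ht) c hc
        rw [pvRt_cons, if_pos hall, List.dropWhile_cons_of_pos hqa, hdt]
        rfl
      · rw [pvRt_cons, if_neg hall, List.dropWhile_cons_of_pos hqa,
          List.dropWhile_cons_of_pos hqa, ih]
    · rw [pvRt_cons, if_neg (by simp [hqa]), List.dropWhile_cons_of_neg hqa,
        List.dropWhile_cons_of_neg hqa, pvRt_cons, if_neg (by simp [hqa])]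

-- trimming with a sub-predicate p ≤ q never changes the q-trim
theorem pvTrQ_Lt {p : Char → Bool} (himp : ∀ c, p c = true → pvQ c = true)
    (x : List Char) : pvTr pvQ (x.dropWhile p) = pvTr pvQ x := by
  unfold pvTr
  rw [pvDw_dw himp]

theorem pvTrQ_Rt {p : Char → Bool} (himp : ∀ c, p c = true → pvQ c = true)
    (x : List Char) : pvTr pvQ (x.reverse.dropWhile p).reverse = pvTr pvQ x := by
  unfold pvTr
  rw [← pvLtRt_comm pvQ ((x.reverse.dropWhile p).reverse), ← pvLtRt_comm pvQ x]
  simp only [List.reverse_reverse]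
  rw [pvDw_dw himp]

theorem pvTrQ_Tr {p : Char → Bool} (himp : ∀ c, p c = true → pvQ c = true)
    (x : List Char) : pvTr pvQ (pvTr p x) = pvTr pvQ x := by
  have h1 := pvTrQ_Rt himp (x.dropWhile p)
  have h2 := pvTrQ_Lt himp x
  unfold pvTr at h1 h2 ⊢
  rw [h1, h2]

theorem pvWs_le (c : Char) (h : PySem.Chars.isspace c = true) : pvQ c = true := by
  simp [pvQ, h]

theorem pvBq_le (c : Char) (h : List.contains ['`'] c = true) : pvQ c = true := by
  have hc : c = '`' := by simpa using h
  subst hc; decide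

theorem pvSq_le (c : Char) (h : List.contains ['\''] c = true) : pvQ c = true := by
  have hc : c = '\'' := by simpa using h
  subst hc; decide

theorem pvDq_le (c : Char) (h : List.contains ['"'] c = true) : pvQ c = true := by
  have hc : c = '"' := by simpa using h
  subst hc; decide

-- one A-step leaves the total q-trim unchanged
theorem pvTrQ_step (l : List Char) : pvTr pvQ (pvStepA l) = pvTr pvQ l := by
  unfold pvStepA
  rw [pvStrip_eq_Tr, pvStripChars_eq_Tr, pvStrip_eq_Tr, pvStripChars_eq_Tr,
    pvStrip_eq_Tr, pvStripChars_eq_Tr, pvStrip_eq_Tr]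
  rw [pvTrQ_Tr pvWs_le, pvTrQ_Tr pvDq_le, pvTrQ_Tr pvWs_le, pvTrQ_Tr pvSq_le,
    pvTrQ_Tr pvWs_le, pvTrQ_Tr pvBq_le, pvTrQ_Tr pvWs_le]

theorem pvTr_id_of_Lt_id (p : Char → Bool) (l : List Char)
    (h1 : l.dropWhile p = l) (h2 : l.reverse.dropWhile p = l.reverse) :
    pvTr p l = l := by
  unfold pvTr
  rw [h1, h2, List.reverse_reverse]

theorem pvTr_id_split (p : Char → Bool) (l : List Char) (h : pvTr p l = l) :
    l.dropWhile p = l ∧ l.reverse.dropWhile p = l.reverse := by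
  have hlen : (pvTr p l).length = l.length := by rw [h]
  have h1 := pvDw_len p l
  have h2 := pvDw_len p (l.dropWhile p).reverse
  unfold pvTr at hlen h2
  simp only [List.length_reverse] at hlen h2
  have e1 : l.dropWhile p = l := pvDw_eq_of_len p l (by omega)
  refine ⟨e1, ?_⟩
  unfold pvTr at h
  rw [e1] at h
  have h3 : (l.reverse.dropWhile p).reverse = l := by simpa using h
  have h4 := congrArg List.reverse h3
  simpa using h4

-- a fixpoint of A's step is already fully q-trimmed
theorem pvFix_trimmed (l : List Char) (h : pvStepA l = l) : pvTr pvQ l = l := by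
  obtain ⟨e1, e2, e3, e4, -⟩ := pvStepA_fixes l (by rw [h])
  obtain ⟨f1, g1⟩ := pvTr_id_split _ _ e1
  obtain ⟨f2, g2⟩ := pvTr_id_split _ _ e2
  obtain ⟨f3, g3⟩ := pvTr_id_split _ _ e3
  obtain ⟨f4, g4⟩ := pvTr_id_split _ _ e4
  apply pvTr_id_of_Lt_id
  · rw [List.dropWhile_eq_self_iff] at f1 f2 f3 f4 ⊢
    intro hl hq
    simp only [pvQ, Bool.or_eq_true] at hq
    rcases hq with (((hs | hb) | hs') | hd)
    · exact f1 hl hs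
    · exact f2 hl (by simp only [List.contains_cons, hb, Bool.true_or])
    · exact f3 hl (by simp only [List.contains_cons, hs', Bool.true_or])
    · exact f4 hl (by simp only [List.contains_cons, hd, Bool.true_or])
  · rw [List.dropWhile_eq_self_iff] at g1 g2 g3 g4 ⊢
    intro hl hq
    simp only [pvQ, Bool.or_eq_true] at hq
    rcases hq with (((hs | hb) | hs') | hd)
    · exact g1 hl hs
    · exact g2 hl (by simp only [List.contains_cons, hb, Bool.true_or])
    · exact g3 hl (by simp only [List.contains_cons, hs', Bool.true_or])
    · exact g4 hl (by simp only [List.contains_cons, hd, Bool.true_or])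

-- the loop computes exactly the total q-trim
theorem pvLoopA_eq (l : List Char) : pvLoopA l = pvTr pvQ l := by
  by_cases h : pvStepA l = l
  · rw [pvLoopA, dif_pos h, pvFix_trimmed l h]
  · rw [pvLoopA, dif_neg h, pvLoopA_eq (pvStepA l), pvTrQ_step]
termination_by l.length
decreasing_by exact pvStepA_lt l h

-- ===== VERDICT (by name: the statement is the Claim_ definition above) =====
theorem sanitize_url_py_spec : Claim_equal_sanitize_url_py := by
  intro url _
  unfold Spec_sanitize_url_py sanitize_url_py sanitize_url_py_alt
  simp only []
  rw [pvStrip_eq_Tr, pvLoopA_eq, pvTrQ_Tr pvWs_le]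
  rfl
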